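-- pv_equiv track=rewrite | github.com/shuangpe/cutlass | scripts/gpu_monitor/parsers/parse_nvsim_log.py | filter_idle_periods
-- ===== SOURCE A (Python) =====
-- def filter_idle_periods(data, utilization_field='GPUUtilization', retain_count=0):
--     """
--     Filter out consecutive GPU utilization records with 0% usage at the beginning and end,
--     but retain a specified number of idle records for reference.
--
--     Args:
--         data: List of parsed data entries
--         utilization_field: GPU utilization field name (internal field name, not CSV column name)
--         retain_count: Number of idle records to keep at the beginning and end
--
--     Returns:
--         Filtered list of data entries
--     """
--     if not data:
--         return data
--
--     # Find the index of the maximum utilization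
--     max_idx = 0
--     max_value = -1
--     for i, entry in enumerate(data):
--         try:
--             value = int(entry[utilization_field])
--             if value >= max_value:
--                 max_value = value
--                 max_idx = i
--         except (ValueError, TypeError):
--             continue
--
--     # Scan from the maximum index to the left to find the second zero
--     left_zero_count = 0
--     start_idx = max_idx
--     for i in range(max_idx, -1, -1):
--         try:
--             if data[i][utilization_field] == 'N/A' or int(data[i][utilization_field]) == 0:
--                 start_idx = i+1
--                 break
--         except (ValueError, TypeError):
--             continue
--
--     # Scan from the maximum index to the right to find the second zero
--     right_zero_count = 0
--     end_idx = max_idx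
--     for i in range(max_idx, len(data)):
--         try:
--             if data[i][utilization_field] == 'N/A' or int(data[i][utilization_field]) == 0:
--                 end_idx = i-1
--                 break
--         except (ValueError, TypeError):
--             continue
--
--     # Adjust indices to retain some idle records
--     start_idx = max(0, start_idx - retain_count)
--     end_idx = min(len(data) - 1, end_idx + retain_count)
--
--     return data[start_idx:end_idx + 1]
-- ===== SOURCE B (Python) =====
-- def filter_idle_periods(data, utilization_field='GPUUtilization', retain_count=0):
--     """Trim idle records around the last maximum-utilization entry.
--
--     Decomposition: one running-max pass picks the last index of the maximum
--     reading (unparseable readings are skipped), the idle indices ('N/A' or 0)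
--     are collected once, and the trim boundaries are the nearest idle index on
--     each side of the maximum, instead of scanning outward from it.
--     """
--     if not data:
--         return data
--
--     max_idx, max_value = 0, -1
--     for i, entry in enumerate(data):
--         try:
--             v = int(entry[utilization_field])
--         except (ValueError, TypeError):
--             continue
--         if v >= max_value:
--             max_idx, max_value = i, v
--
--     def is_idle(s):
--         if s == 'N/A':
--             return True
--         try:
--             return int(s) == 0
--         except (ValueError, TypeError):
--             return False
--
--     zeros = [i for i, e in enumerate(data) if is_idle(e[utilization_field])]
--     left = max((i for i in zeros if i <= max_idx), default=None)
--     right = min((i for i in zeros if i >= max_idx), default=None)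
--     start_idx = left + 1 if left is not None else max_idx
--     end_idx = right - 1 if right is not None else max_idx
--
--     start_idx = max(0, start_idx - retain_count)
--     end_idx = min(len(data) - 1, end_idx + retain_count)
--     return data[start_idx:end_idx + 1]
-- ===== Notes on version B (the rewrite author's own statement) =====
-- stated objective: alternative
-- what changed: B replaces A's two outward boundary scans from the maximum (break on the first idle entry) with a different decomposition: collect the idle ('N/A'/zero) indices once and pick the nearest idle index on each side of the last maximum via max/min over that list; Pre_ excludes only inputs where some entry lacks the utilization field, on which A raises KeyError.
import Mathlib
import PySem

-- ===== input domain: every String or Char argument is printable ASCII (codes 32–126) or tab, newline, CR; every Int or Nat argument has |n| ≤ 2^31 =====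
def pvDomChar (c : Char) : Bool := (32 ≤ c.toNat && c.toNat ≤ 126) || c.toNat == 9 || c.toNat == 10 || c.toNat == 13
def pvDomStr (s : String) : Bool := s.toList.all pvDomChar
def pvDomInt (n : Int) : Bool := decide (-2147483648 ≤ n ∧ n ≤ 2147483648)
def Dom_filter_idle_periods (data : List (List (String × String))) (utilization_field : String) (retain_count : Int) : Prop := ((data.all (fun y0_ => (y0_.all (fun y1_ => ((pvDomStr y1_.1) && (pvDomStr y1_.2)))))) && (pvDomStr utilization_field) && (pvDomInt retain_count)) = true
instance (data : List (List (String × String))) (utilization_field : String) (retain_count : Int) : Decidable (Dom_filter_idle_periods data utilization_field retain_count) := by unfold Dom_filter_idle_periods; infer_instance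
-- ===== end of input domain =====

-- B finds the trim boundaries by collecting the idle indices once and taking the nearest idle index
-- on each side of the maximum, instead of A's two outward break-scans; equal returns on every input
-- where Python A returns (missing-key inputs, where both raise KeyError, sit outside Pre_).

-- entry[field]: first-match association-list lookup; "" stands for the missing-key case, which Pre_
-- excludes (Python raises KeyError there, in A and in B alike)
def pvField (e : List (String × String)) (f : String) : String :=
  ((e.find? (fun kv => kv.1 == f)).map (fun kv => kv.2)).getD ""

-- the running-max loop (identical in Source A and Source B): `value >= max_value` updates max_idx and
-- max_value; entries whose int() raises are skipped
def pvMaxScan (f : String) : List (List (String × String)) → Nat → Nat × Int → Nat × Int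
  | [], _, st => st
  | e :: rest, i, (mi, mv) =>
    match PySem.Int.ofStr? (pvField e f) with
    | some v => if mv ≤ v then pvMaxScan f rest (i + 1) (i, v) else pvMaxScan f rest (i + 1) (mi, mv)
    | none => pvMaxScan f rest (i + 1) (mi, mv)

-- ===== PORT A =====
-- A's break condition `s == 'N/A' or int(s) == 0`; a ValueError lands in `continue`, exactly as this Bool being false
def pvIdleA (s : String) : Bool := s == "N/A" || PySem.Int.ofStr? s == some 0

-- `for i in range(max_idx, -1, -1)`: break with i+1, else fall off the range keeping start_idx = max_idx
def pvA_left (data : List (List (String × String))) (f : String) (maxIdx : Nat) : Nat → Int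
  | 0 => if pvIdleA (pvField (data.getD 0 []) f) then 1 else (maxIdx : Int)
  | i + 1 => if pvIdleA (pvField (data.getD (i + 1) []) f) then (i : Int) + 2 else pvA_left data f maxIdx i

-- `for i in range(max_idx, len(data))`: break with i-1, else fall off the range keeping end_idx = max_idx
def pvA_right (data : List (List (String × String))) (f : String) (maxIdx : Nat) (i : Nat) : Int :=
  if _h : i < data.length then
    if pvIdleA (pvField (data.getD i []) f) then (i : Int) - 1 else pvA_right data f maxIdx (i + 1)
  else (maxIdx : Int)
termination_by data.length - i

def filter_idle_periods (data : List (List (String × String))) (utilization_field : String) (retain_count : Int) : List (List (String × String)) :=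
  match data with
  | [] => data
  | _ :: _ =>
    let maxIdx := (pvMaxScan utilization_field data 0 (0, -1)).1
    let startIdx := pvA_left data utilization_field maxIdx maxIdx
    let endIdx := pvA_right data utilization_field maxIdx maxIdx
    let startIdx' := max 0 (startIdx - retain_count)
    let endIdx' := min ((data.length : Int) - 1) (endIdx + retain_count)
    PySem.List.slice data (some startIdx') (some (endIdx' + 1))

-- ===== PORT B =====
-- B's is_idle(s)
def pvIdleB (s : String) : Bool := s == "N/A" || PySem.Int.ofStr? s == some 0

def filter_idle_periods_alt (data : List (List (String × String))) (utilization_field : String) (retain_count : Int) : List (List (String × String)) :=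
  if data.isEmpty then data
  else
    let maxIdx : Nat := (pvMaxScan utilization_field data 0 (0, -1)).1
    let zeros : List Int :=
      (PySem.List.enumerate data).filterMap (fun p => if pvIdleB (pvField p.2 utilization_field) then some p.1 else none)
    let left := PySem.List.max? (zeros.filter (fun i => i ≤ (maxIdx : Int))) (fun i => i)
    let right := PySem.List.min? (zeros.filter (fun i => (maxIdx : Int) ≤ i)) (fun i => i)
    let startIdx : Int := match left with | some l => l + 1 | none => (maxIdx : Int)
    let endIdx : Int := match right with | some r => r - 1 | none => (maxIdx : Int)
    let startIdx' := max 0 (startIdx - retain_count)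
    let endIdx' := min ((data.length : Int) - 1) (endIdx + retain_count)
    PySem.List.slice data (some startIdx') (some (endIdx' + 1))

-- ===== PRECONDITION & SPEC =====
-- Pre_ excludes exactly the inputs where some entry lacks the utilization field: there Python A (and B)
-- raises KeyError instead of returning.
def Pre_filter_idle_periods (data : List (List (String × String))) (utilization_field : String) (retain_count : Int) : Prop :=
  ∀ e ∈ data, (e.find? (fun kv => kv.1 == utilization_field)).isSome = true

instance (data : List (List (String × String))) (utilization_field : String) (retain_count : Int) : Decidable (Pre_filter_idle_periods data utilization_field retain_count) := by unfold Pre_filter_idle_periods; infer_instance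

def pvWitness_filter_idle_periods : (List (List (String × String))) × String × Int :=
  ([[("u", "0")], [("u", "5")], [("u", "0")]], "u", 0)

def Spec_filter_idle_periods (data : List (List (String × String))) (utilization_field : String) (retain_count : Int) (out : List (List (String × String))) : Prop := out = filter_idle_periods_alt data utilization_field retain_count
instance (data : List (List (String × String))) (utilization_field : String) (retain_count : Int) (out : List (List (String × String))) : Decidable (Spec_filter_idle_periods data utilization_field retain_count out) := by unfold Spec_filter_idle_periods; infer_instance

-- ===== CLAIM (what is proved, stated in full; the proofs are below) =====
def Claim_equal_filter_idle_periods : Prop := ∀ (data : List (List (String × String))) (utilization_field : String) (retain_count : Int), Dom_filter_idle_periods data utilization_field retain_count → Pre_filter_idle_periods data utilization_field retain_count → Spec_filter_idle_periods data utilization_field retain_count (filter_idle_periods data utilization_field retain_count)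

-- ===== LEMMAS AND PROOFS =====

-- the two idle predicates are the same function
theorem pvIdleB_eq (s : String) : pvIdleB s = pvIdleA s := rfl

-- the running-max scan either keeps the seed index or returns an index of a scanned position
theorem pvMaxScan_fst_bound (f : String) (l : List (List (String × String))) :
    ∀ (i : Nat) (st : Nat × Int),
      (pvMaxScan f l i st).1 = st.1 ∨ (i ≤ (pvMaxScan f l i st).1 ∧ (pvMaxScan f l i st).1 < i + l.length) := by
  induction l with
  | nil => intro i st; left; rfl
  | cons e l ih =>
    intro i st
    obtain ⟨mi, mv⟩ := st
    simp only [pvMaxScan]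
    cases hv : PySem.Int.ofStr? (pvField e f) with
    | none =>
      rcases ih (i + 1) (mi, mv) with h | h
      · left; exact h
      · right; simp only [List.length_cons]; omega
    | some v =>
      simp only []
      by_cases hle : mv ≤ v
      · rw [if_pos hle]
        rcases ih (i + 1) (i, v) with h | h
        · right; rw [h]; simp only [List.length_cons]; omega
        · right; simp only [List.length_cons]; omega
      · rw [if_neg hle]
        rcases ih (i + 1) (mi, mv) with h | h
        · left; exact h
        · right; simp only [List.length_cons]; omega

-- structural idle-index list
def pvZeros (f : String) : List (List (String × String)) → Nat → List Int
  | [], _ => []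
  | e :: l, i => if pvIdleA (pvField e f) then (i : Int) :: pvZeros f l (i + 1) else pvZeros f l (i + 1)

-- B's filterMap over enumerate is the structural idle-index list
theorem zeros_eq (f : String) (l : List (List (String × String))) (i : Nat) :
    (PySem.List.enumerate l (i : Int)).filterMap
        (fun p => if pvIdleB (pvField p.2 f) then some p.1 else none) = pvZeros f l i := by
  induction l generalizing i with
  | nil => simp [pvZeros, PySem.List.enumerate_nil]
  | cons e l ih =>
    rw [PySem.List.enumerate_cons, List.filterMap_cons]
    have : ((i : Int) + 1) = ((i + 1 : Nat) : Int) := by push_cast; ring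
    rw [this, ih]
    by_cases h1 : pvIdleA (pvField e f) = true <;>
      simp [pvZeros, pvIdleB_eq, h1]

-- membership in the structural idle-index list
theorem mem_pvZeros (f : String) (l : List (List (String × String))) (i : Nat) (x : Int) :
    x ∈ pvZeros f l i ↔ ∃ k, k < l.length ∧ x = ((i + k : Nat) : Int) ∧ pvIdleA (pvField (l.getD k []) f) = true := by
  induction l generalizing i with
  | nil => simp [pvZeros]
  | cons e l ih =>
    constructor
    · intro hx
      simp only [pvZeros] at hx
      by_cases h1 : pvIdleA (pvField e f) = true
      · rw [if_pos h1] at hx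
        rcases List.mem_cons.mp hx with h | h
        · exact ⟨0, by simp, by simpa using h, by simpa using h1⟩
        · rcases (ih (i + 1)).mp h with ⟨k, hk, hxk, hkidle⟩
          refine ⟨k + 1, by simpa using hk, ?_, by simpa using hkidle⟩
          rw [hxk]; congr 1; omega
      · rw [if_neg h1] at hx
        rcases (ih (i + 1)).mp hx with ⟨k, hk, hxk, hkidle⟩
        refine ⟨k + 1, by simpa using hk, ?_, by simpa using hkidle⟩
        rw [hxk]; congr 1; omega
    · rintro ⟨k, hk, hxk, hkidle⟩
      simp only [pvZeros]
      cases k with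
      | zero =>
        simp only [List.getD_cons_zero] at hkidle
        rw [if_pos hkidle]
        simp [hxk]
      | succ k =>
        have hm : x ∈ pvZeros f l (i + 1) := by
          refine (ih (i + 1)).mpr ⟨k, by simpa using hk, ?_, by simpa using hkidle⟩
          rw [hxk]; congr 1; omega
        by_cases h1 : pvIdleA (pvField e f) = true <;> simp [h1, hm]

-- max?/min? with the identity key are determined by an upper/lower bound in the list
theorem max?_id_eq (xs : List Int) (l : Int) (hl : l ∈ xs) (hub : ∀ y ∈ xs, y ≤ l) :
    PySem.List.max? xs (fun i => i) = some l := by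
  cases h : PySem.List.max? xs (fun i => i) with
  | none => rw [PySem.List.max?_eq_none_iff] at h; subst h; simp at hl
  | some m =>
    have hm := PySem.List.max?_mem h
    have hle := PySem.List.max?_isMax h l hl
    have := hub m hm
    simp only [Option.some.injEq]
    omega

theorem min?_id_eq (xs : List Int) (l : Int) (hl : l ∈ xs) (hlb : ∀ y ∈ xs, l ≤ y) :
    PySem.List.min? xs (fun i => i) = some l := by
  cases h : PySem.List.min? xs (fun i => i) with
  | none => rw [PySem.List.min?_eq_none_iff] at h; subst h; simp at hl
  | some m =>
    have hm := PySem.List.min?_mem h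
    have hle := PySem.List.min?_isMin h l hl
    have := hlb m hm
    simp only [Option.some.injEq]
    omega

-- A's leftward scan: no idle index at or below i
theorem pvA_left_none (data : List (List (String × String))) (f : String) (m i : Nat)
    (h : ∀ j, j ≤ i → pvIdleA (pvField (data.getD j []) f) = false) :
    pvA_left data f m i = (m : Int) := by
  induction i with
  | zero =>
    simp only [pvA_left]
    rw [if_neg (by simpa using h 0 (le_refl 0))]
  | succ i ih =>
    simp only [pvA_left]
    rw [if_neg (by simpa using h (i + 1) (le_refl _))]
    exact ih (fun j hj => h j (by omega))

-- A's leftward scan: j is the greatest idle index at or below i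
theorem pvA_left_found (data : List (List (String × String))) (f : String) (m i j : Nat)
    (hji : j ≤ i) (hj : pvIdleA (pvField (data.getD j []) f) = true)
    (hmax : ∀ k, j < k → k ≤ i → pvIdleA (pvField (data.getD k []) f) = false) :
    pvA_left data f m i = (j : Int) + 1 := by
  induction i with
  | zero =>
    have hj0 : j = 0 := by omega
    subst hj0
    simp only [pvA_left]
    rw [if_pos hj]
    norm_num
  | succ i ih =>
    by_cases hji' : j = i + 1
    · subst hji'
      simp only [pvA_left]
      rw [if_pos hj]
      push_cast; ring
    · have hle : j ≤ i := by omega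
      simp only [pvA_left]
      rw [if_neg (by simpa using hmax (i + 1) (by omega) (le_refl _))]
      exact ih hle (fun k hk1 hk2 => hmax k hk1 (by omega))

-- A's rightward scan: no idle index in [i, length)
theorem pvA_right_none (data : List (List (String × String))) (f : String) (m i : Nat)
    (h : ∀ j, i ≤ j → j < data.length → pvIdleA (pvField (data.getD j []) f) = false) :
    pvA_right data f m i = (m : Int) := by
  suffices H : ∀ d i, data.length - i ≤ d →
      (∀ j, i ≤ j → j < data.length → pvIdleA (pvField (data.getD j []) f) = false) →
      pvA_right data f m i = (m : Int) from H _ i le_rfl h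
  intro d
  induction d with
  | zero =>
    intro i hd _
    rw [pvA_right, dif_neg (by omega)]
  | succ d ih =>
    intro i hd hh
    rw [pvA_right]
    by_cases hi : i < data.length
    · rw [dif_pos hi, if_neg (by simpa using hh i le_rfl hi)]
      exact ih (i + 1) (by omega) (fun j hj hjn => hh j (by omega) hjn)
    · rw [dif_neg hi]

-- A's rightward scan: j is the least idle index in [i, length)
theorem pvA_right_found (data : List (List (String × String))) (f : String) (m i j : Nat)
    (hij : i ≤ j) (hjn : j < data.length) (hj : pvIdleA (pvField (data.getD j []) f) = true)
    (hmin : ∀ k, i ≤ k → k < j → pvIdleA (pvField (data.getD k []) f) = false) :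
    pvA_right data f m i = (j : Int) - 1 := by
  revert i hij hmin
  suffices H : ∀ d i, data.length - i ≤ d → i ≤ j →
      (∀ k, i ≤ k → k < j → pvIdleA (pvField (data.getD k []) f) = false) →
      pvA_right data f m i = (j : Int) - 1 from fun i hij hmin => H _ i le_rfl hij hmin
  intro d
  induction d with
  | zero => intro i hd hij _; omega
  | succ d ih =>
    intro i hd hij hmin
    rw [pvA_right, dif_pos (by omega)]
    by_cases hij' : i = j
    · subst hij'
      rw [if_pos hj]
    · rw [if_neg (by simpa using hmin i le_rfl (by omega))]
      exact ih (i + 1) (by omega) (by omega) (fun k hk1 hk2 => hmin k (by omega) hk2)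

-- B's nearest idle index at or below m, plus one, is A's leftward scan from m
theorem main_left (data : List (List (String × String))) (f : String) (m : Nat) (hm : m < data.length) :
    (match PySem.List.max? ((pvZeros f data 0).filter (fun x => decide (x ≤ (m : Int)))) (fun i => i) with
     | some l => l + 1
     | none => (m : Int)) = pvA_left data f m m := by
  by_cases hex : ∃ j, j ≤ m ∧ pvIdleA (pvField (data.getD j []) f) = true
  · obtain ⟨j0, hj0le, hj0⟩ := hex
    have hgP : pvIdleA (pvField (data.getD (Nat.findGreatest
        (fun j => pvIdleA (pvField (data.getD j []) f) = true) m) []) f) = true :=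
      Nat.findGreatest_spec (P := fun j => pvIdleA (pvField (data.getD j []) f) = true) hj0le hj0
    have hgle := Nat.findGreatest_le
      (P := fun j => pvIdleA (pvField (data.getD j []) f) = true) m
    have hggr : ∀ k, Nat.findGreatest (fun j => pvIdleA (pvField (data.getD j []) f) = true) m < k →
        k ≤ m → pvIdleA (pvField (data.getD k []) f) = false := by
      intro k h1 h2
      have := Nat.findGreatest_is_greatest h1 h2
      simpa using this
    have hmaxeq : PySem.List.max? ((pvZeros f data 0).filter (fun x => decide (x ≤ (m : Int))))
        (fun i => i) = some ((Nat.findGreatest (fun j => pvIdleA (pvField (data.getD j []) f) = true) m : Nat) : Int) := by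
      apply max?_id_eq
      · rw [List.mem_filter]
        refine ⟨(mem_pvZeros f data 0 _).mpr ⟨_, by omega, by simp, hgP⟩,
          by simp only [decide_eq_true_eq]; exact_mod_cast hgle⟩
      · intro y hy
        rw [List.mem_filter] at hy
        obtain ⟨hy1, hy2⟩ := hy
        obtain ⟨k, hk, rfl, hkidle⟩ := (mem_pvZeros f data 0 _).mp hy1
        simp only [decide_eq_true_eq] at hy2
        have hkm : k ≤ m := by omega
        have hkg : k ≤ Nat.findGreatest (fun j => pvIdleA (pvField (data.getD j []) f) = true) m := by
          by_contra hc
          push_neg at hc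
          rw [hggr k hc hkm] at hkidle
          exact absurd hkidle (by simp)
        omega
    rw [hmaxeq, pvA_left_found data f m m _ hgle hgP hggr]
  · push_neg at hex
    have hnone : (pvZeros f data 0).filter (fun x => decide (x ≤ (m : Int))) = [] := by
      rw [List.filter_eq_nil_iff]
      intro a ha
      obtain ⟨k, hk, rfl, hkidle⟩ := (mem_pvZeros f data 0 _).mp ha
      simp only [decide_eq_true_eq, not_le]
      by_contra hc
      push_neg at hc
      exact hex k (by omega) hkidle
    rw [hnone, show PySem.List.max? ([] : List Int) (fun i => i) = none from
      (PySem.List.max?_eq_none_iff _ _).mpr rfl]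
    rw [pvA_left_none data f m m (fun j hj => by
      have := hex j hj
      simpa using this)]

-- B's nearest idle index at or above m, minus one, is A's rightward scan from m
theorem main_right (data : List (List (String × String))) (f : String) (m : Nat) (hm : m < data.length) :
    (match PySem.List.min? ((pvZeros f data 0).filter (fun x => decide ((m : Int) ≤ x))) (fun i => i) with
     | some r => r - 1
     | none => (m : Int)) = pvA_right data f m m := by
  by_cases hex : ∃ j, m ≤ j ∧ j < data.length ∧ pvIdleA (pvField (data.getD j []) f) = true
  · have hP := Nat.find_spec hex
    obtain ⟨hg1, hg2, hg3⟩ := hP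
    have hmin : ∀ k, m ≤ k → k < Nat.find hex → pvIdleA (pvField (data.getD k []) f) = false := by
      intro k hk1 hk2
      by_contra hc
      have hkt : pvIdleA (pvField (data.getD k []) f) = true := by
        cases h : pvIdleA (pvField (data.getD k []) f) with
        | false => exact absurd h hc
        | true => rfl
      have := Nat.find_min' hex ⟨hk1, by omega, hkt⟩
      omega
    have hmineq : PySem.List.min? ((pvZeros f data 0).filter (fun x => decide ((m : Int) ≤ x)))
        (fun i => i) = some ((Nat.find hex : Nat) : Int) := by
      apply min?_id_eq
      · rw [List.mem_filter]
        refine ⟨(mem_pvZeros f data 0 _).mpr ⟨_, hg2, by simp, hg3⟩,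
          by simp only [decide_eq_true_eq]; exact_mod_cast hg1⟩
      · intro y hy
        rw [List.mem_filter] at hy
        obtain ⟨hy1, hy2⟩ := hy
        obtain ⟨k, hk, rfl, hkidle⟩ := (mem_pvZeros f data 0 _).mp hy1
        simp only [decide_eq_true_eq] at hy2
        have hkm : m ≤ k := by omega
        have := Nat.find_min' hex ⟨hkm, by omega, hkidle⟩
        omega
    rw [hmineq, pvA_right_found data f m m _ hg1 hg2 hg3 hmin]
  · push_neg at hex
    have hnone : (pvZeros f data 0).filter (fun x => decide ((m : Int) ≤ x)) = [] := by
      rw [List.filter_eq_nil_iff]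
      intro a ha
      obtain ⟨k, hk, rfl, hkidle⟩ := (mem_pvZeros f data 0 _).mp ha
      simp only [decide_eq_true_eq, not_le]
      by_contra hc
      push_neg at hc
      exact hex k (by omega) (by omega) hkidle
    rw [hnone, show PySem.List.min? ([] : List Int) (fun i => i) = none from
      (PySem.List.min?_eq_none_iff _ _).mpr rfl]
    rw [pvA_right_none data f m m (fun j hj1 hj2 => by
      have := hex j hj1 hj2
      simpa using this)]

-- ===== VERDICT (by name: the statement is the Claim_ definition above) =====
theorem filter_idle_periods_spec : Claim_equal_filter_idle_periods := by
  intro data f rc _hdom _hpre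
  unfold Spec_filter_idle_periods
  cases data with
  | nil => rfl
  | cons e0 rest =>
    simp only [filter_idle_periods, filter_idle_periods_alt, List.isEmpty_cons, Bool.false_eq_true,
      if_false]
    rw [show (PySem.List.enumerate (e0 :: rest)).filterMap
          (fun p => if pvIdleB (pvField p.2 f) then some p.1 else none) = pvZeros f (e0 :: rest) 0
        from by simpa using zeros_eq f (e0 :: rest) 0]
    have hm : (pvMaxScan f (e0 :: rest) 0 (0, -1)).1 < (e0 :: rest).length := by
      rcases pvMaxScan_fst_bound f (e0 :: rest) 0 (0, -1) with h | h
      · rw [h]; simp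
      · omega
    rw [main_left (e0 :: rest) f _ hm, main_right (e0 :: rest) f _ hm]
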